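-- pv_equiv track=rewrite | github.com/Azhrdev/stego-ai | stegoai/utils/error_correction.py | interleave_bits
-- ===== SOURCE A (Python) =====
-- from typing import List, Tuple, Union, Optional
--
-- def interleave_bits(bits: List[int], block_size: int = 8) -> List[int]:
--     """
--     Interleave bits to protect against burst errors.
--
--     Args:
--         bits: Input bits
--         block_size: Size of interleaving blocks
--
--     Returns:
--         list: Interleaved bits
--     """
--     # Ensure bit count is a multiple of block_size
--     padded_bits = bits.copy()
--     while len(padded_bits) % block_size != 0:
--         padded_bits.append(0)
--
--     # Determine dimensions of the interleaving matrix
--     num_blocks = len(padded_bits) // block_size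
--
--     # Create matrix (filling by rows)
--     matrix = []
--     for i in range(num_blocks):
--         matrix.append(padded_bits[i * block_size:(i + 1) * block_size])
--
--     # Read out matrix by columns
--     interleaved_bits = []
--     for j in range(block_size):
--         for i in range(num_blocks):
--             interleaved_bits.append(matrix[i][j])
--
--     return interleaved_bits
-- ===== SOURCE B (Python) =====
-- from typing import List
--
-- def interleave_bits(bits: List[int], block_size: int = 8) -> List[int]:
--     """Interleave bits by strided slicing: column j of the conceptual
--     row-major matrix is exactly padded[j::block_size]."""
--     pad = (-len(bits)) % block_size
--     padded = bits + [0] * pad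
--     return [x for j in range(block_size) for x in padded[j::block_size]]
-- ===== Notes on version B (the rewrite author's own statement) =====
-- stated objective: faster
-- what changed: B computes the pad length arithmetically and reads each interleaved column directly as the strided slice padded[j::block_size], instead of A's append-until-multiple while loop plus building an explicit row-major matrix and reading it back by nested column loops.
import Mathlib
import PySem

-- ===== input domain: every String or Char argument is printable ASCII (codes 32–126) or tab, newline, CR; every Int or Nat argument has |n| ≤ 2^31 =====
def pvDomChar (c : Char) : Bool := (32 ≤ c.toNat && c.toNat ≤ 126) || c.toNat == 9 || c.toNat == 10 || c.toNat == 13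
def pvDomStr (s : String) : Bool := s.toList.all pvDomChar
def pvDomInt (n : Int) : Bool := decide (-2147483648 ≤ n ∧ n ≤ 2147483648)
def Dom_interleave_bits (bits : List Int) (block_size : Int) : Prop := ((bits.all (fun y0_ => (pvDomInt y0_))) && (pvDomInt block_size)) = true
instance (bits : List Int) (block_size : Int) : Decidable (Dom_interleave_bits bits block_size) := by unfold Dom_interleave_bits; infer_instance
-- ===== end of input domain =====

-- B replaces A's row-matrix construction and nested column read with direct strided
-- slicing (padded[j::block_size] per column); neither implementation mutates its argument.

-- ===== PORT A =====
-- the 'while len(padded_bits) % block_size != 0: padded_bits.append(0)' loop; the fuel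
-- block_size.natAbs is a pure totality guard: for block_size ≠ 0 the loop runs fewer than
-- |block_size| iterations (block_size = 0 raises ZeroDivisionError and is excluded by Pre_)
-- padded_bits is represented as bits ++ (the zeros appended so far): every item the loop
-- appends is the literal 0, so the loop carries the current length and the count of zeros
def pvPadLoopA : Nat → Nat → Int → Nat → Nat
  | 0, _, _, acc => acc
  | f + 1, curLen, bs, acc =>
    if PySem.Int.mod (curLen : Int) bs ≠ 0 then pvPadLoopA f (curLen + 1) bs (acc + 1) else acc

def interleave_bits (bits : List Int) (block_size : Int) : List Int :=
  let padded := bits ++ List.replicate (pvPadLoopA block_size.natAbs bits.length block_size 0) 0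
  let num_blocks := PySem.Int.floordiv (padded.length : Int) block_size
  let matrix := (PySem.List.pyRange 0 num_blocks 1).foldl
      (fun m i => m ++ [PySem.List.slice padded (some (i * block_size)) (some ((i + 1) * block_size))]) []
  (PySem.List.pyRange 0 block_size 1).foldl (fun acc j =>
    (PySem.List.pyRange 0 num_blocks 1).foldl
      (fun acc2 i => acc2 ++ [PySem.List.pyGetD (PySem.List.pyGetD matrix i []) j 0]) acc) []

-- ===== PORT B =====
def interleave_bits_alt (bits : List Int) (block_size : Int) : List Int :=
  let pad := PySem.Int.mod (-(bits.length : Int)) block_size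
  let padded := bits ++ List.replicate pad.toNat 0   -- [0] * pad: empty when pad ≤ 0
  (PySem.List.pyRange 0 block_size 1).flatMap
    (fun j => (PySem.List.slice? padded (some j) none block_size).getD [])

-- ===== PRECONDITION & SPEC =====
-- block_size = 0 makes both Pythons raise ZeroDivisionError at 'len(...) % block_size'
def Pre_interleave_bits (bits : List Int) (block_size : Int) : Prop := block_size ≠ 0
instance (bits : List Int) (block_size : Int) : Decidable (Pre_interleave_bits bits block_size) := by unfold Pre_interleave_bits; infer_instance
def pvWitness_interleave_bits : List Int × Int := ([1, 0, 1], 2)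

def Spec_interleave_bits (bits : List Int) (block_size : Int) (out : List Int) : Prop := out = interleave_bits_alt bits block_size
instance (bits : List Int) (block_size : Int) (out : List Int) : Decidable (Spec_interleave_bits bits block_size out) := by unfold Spec_interleave_bits; infer_instance

-- ===== CLAIM (what is proved, stated in full; the proofs are below) =====
def Claim_equal_interleave_bits : Prop := ∀ (bits : List Int) (block_size : Int), Dom_interleave_bits bits block_size → Pre_interleave_bits bits block_size → Spec_interleave_bits bits block_size (interleave_bits bits block_size)

-- ===== LEMMAS AND PROOFS =====

-- A's padding loop appends exactly (-len) % bs zeros (bs > 0)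
theorem pvPadLoopA_eq (bs : Int) (hbs : 0 < bs) :
    ∀ (fuel : Nat) (curLen acc : Nat),
      (PySem.Int.mod (-(curLen : Int)) bs).toNat ≤ fuel →
      pvPadLoopA fuel curLen bs acc = acc + (PySem.Int.mod (-(curLen : Int)) bs).toNat := by
  intro fuel
  induction fuel with
  | zero =>
    intro curLen acc h
    have h0 : PySem.Int.mod (-(curLen : Int)) bs = 0 := by
      have := PySem.Int.mod_nonneg (-(curLen : Int)) hbs
      omega
    simp [pvPadLoopA, h0]
  | succ f ih =>
    intro curLen acc h
    have hmnn := PySem.Int.mod_nonneg (-(curLen : Int)) hbs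
    have hmlt := PySem.Int.mod_lt (-(curLen : Int)) hbs
    by_cases hz : PySem.Int.mod (curLen : Int) bs = 0
    · have hd : bs ∣ (curLen : Int) := (PySem.Int.mod_eq_zero_iff_dvd _ _).mp hz
      have h0 : PySem.Int.mod (-(curLen : Int)) bs = 0 :=
        (PySem.Int.mod_eq_zero_iff_dvd _ _).mpr (Int.dvd_neg.mpr hd)
      simp [pvPadLoopA, hz, h0]
    · have hd : ¬ bs ∣ (-(curLen : Int)) := fun hdd =>
        hz ((PySem.Int.mod_eq_zero_iff_dvd _ _).mpr (by simpa using Int.dvd_neg.mpr hdd))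
      have hm0 : PySem.Int.mod (-(curLen : Int)) bs ≠ 0 := fun e =>
        hd ((PySem.Int.mod_eq_zero_iff_dvd _ _).mp e)
      have hmpos : 0 < PySem.Int.mod (-(curLen : Int)) bs := by omega
      have hbs2 : 2 ≤ bs := by omega
      have hstep : PySem.Int.mod (-(((curLen + 1 : Nat)) : Int)) bs
          = PySem.Int.mod (-(curLen : Int)) bs - 1 := by
        simp only [PySem.Int.mod_eq_emod_of_pos hbs] at hmpos hmlt ⊢
        have hlen : (((curLen + 1 : Nat)) : Int) = (curLen : Int) + 1 := by push_cast; ring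
        rw [hlen]
        have he : (-((curLen : Int) + 1)) = (-(curLen : Int)) - 1 := by ring
        rw [he, Int.sub_emod]
        have h1 : (1 : Int) % bs = 1 := Int.emod_eq_of_lt (by omega) (by omega)
        rw [h1, Int.emod_eq_of_lt (by omega) (by omega)]
      have hrec := ih (curLen + 1) (acc + 1) (by rw [hstep]; omega)
      rw [hstep] at hrec
      have hunf : pvPadLoopA (f + 1) curLen bs acc = pvPadLoopA f (curLen + 1) bs (acc + 1) := by
        simp [pvPadLoopA, hz]
      rw [hunf, hrec]
      omega

-- B's strided slice padded[j::b] is the j-th column of the conceptual q×b matrix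
theorem slice_col (padded : List Int) (b q : Nat) (hb : 0 < b) (hN : padded.length = q * b)
    (j : Int) (hj0 : 0 ≤ j) (hj : j.toNat < b) :
    PySem.List.slice? padded (some j) none (b : Int) =
      some ((List.range q).map (fun i => padded.getD (j.toNat + i * b) 0)) := by
  have hbz : (b : Int) ≠ 0 := by exact_mod_cast hb.ne'
  have hbpos : (0 : Int) < b := by exact_mod_cast hb
  have hnneg : ¬ ((b : Int) < 0) := by omega
  have hjneg : ¬ (j < 0) := by omega
  simp only [PySem.List.slice?, PySem.List.sliceIndices, hbz, if_false, if_neg hnneg,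
    if_pos hbpos, if_neg hjneg, hN]
  rcases Nat.eq_zero_or_pos q with hq | hq
  · subst hq
    simp only [Nat.zero_mul] at hN ⊢
    simp [hN]
  · have hjN : j < ((q * b : Nat) : Int) := by
      have : b ≤ q * b := Nat.le_mul_of_pos_left b hq
      omega
    have hmin : min j ((q * b : Nat) : Int) = j := by omega
    rw [hmin, if_pos hjN]
    have hcount : ((((q * b : Nat) : Int) - j + b - 1) / b).toNat = q := by
      have he : (((q * b : Nat) : Int) - j + b - 1) = (b - 1 - j) + b * q := by
        push_cast; ring
      rw [he, Int.add_mul_ediv_left _ _ hbz, Int.ediv_eq_zero_of_lt (by omega) (by omega)]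
      omega
    rw [hcount]
    congr 1
    apply List.filterMap_eq_map_iff_forall_eq_some.mpr
    intro k hk
    have hkq : k < q := List.mem_range.mp hk
    have hidx : (j + (b : Int) * k).toNat = j.toNat + k * b := by
      rw [mul_comm]; omega
    have hlt : j.toNat + k * b < padded.length := by
      rw [hN]
      have : k * b + b ≤ q * b := by
        have : k + 1 ≤ q := hkq
        calc k * b + b = (k + 1) * b := by ring
        _ ≤ q * b := Nat.mul_le_mul_right b this
      omega
    rw [hidx, List.getElem?_eq_getElem hlt, List.getD_eq_getElem padded 0 hlt]

-- A's column read of the row-built matrix yields the same column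
theorem matrix_col (padded : List Int) (b q : Nat) (hb : 0 < b) (hN : padded.length = q * b)
    (j : Int) (hj0 : 0 ≤ j) (hj : j.toNat < b) :
    (PySem.List.pyRange 0 (q : Int) 1).map (fun i =>
        PySem.List.pyGetD (PySem.List.pyGetD
          ((PySem.List.pyRange 0 (q : Int) 1).map (fun i' =>
            PySem.List.slice padded (some (i' * (b : Int))) (some ((i' + 1) * (b : Int))))) i [])
          j 0)
      = (List.range q).map (fun i => padded.getD (j.toNat + i * b) 0) := by
  rw [PySem.List.pyRange_zero_nat, List.map_map, List.map_map]
  apply List.map_congr_left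
  intro k hk
  have hkq : k < q := List.mem_range.mp hk
  have hk0 : (0 : Int) ≤ (k : Int) := by positivity
  simp only [Function.comp_apply]
  have hrow : PySem.List.pyGetD
      ((List.range q).map ((fun i' => PySem.List.slice padded (some (i' * (b : Int)))
        (some ((i' + 1) * (b : Int)))) ∘ (fun k' : Nat => ((k' : Int))))) (k : Int) []
      = PySem.List.slice padded (some ((k : Int) * b)) (some (((k : Int) + 1) * b)) := by
    rw [PySem.List.pyGetD_eq_getElem _ _ hk0 (by simp; exact_mod_cast hkq)]
    simp
  rw [hrow]
  have hslice : PySem.List.slice padded (some ((k : Int) * b)) (some (((k : Int) + 1) * b))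
      = (padded.drop (k * b)).take b := by
    rw [PySem.List.slice_toNat padded (by positivity) (by positivity),
      show ((k : Int) * (b : Int)) = ((k * b : Nat) : Int) by push_cast; ring,
      show (((k : Int) + 1) * (b : Int)) = (((k + 1) * b : Nat) : Int) by push_cast; ring,
      Int.toNat_natCast, Int.toNat_natCast, Nat.succ_mul]
    congr 1
    omega
  rw [hslice]
  have hble : k * b + b ≤ q * b := by
    calc k * b + b = (k + 1) * b := by ring
    _ ≤ q * b := Nat.mul_le_mul_right b hkq
  have hrlen : ((padded.drop (k * b)).take b).length = b := by
    simp [hN]; omega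
  have hjr : j.toNat < ((padded.drop (k * b)).take b).length := by omega
  have hjp : k * b + j.toNat < padded.length := by rw [hN]; omega
  rw [PySem.List.pyGetD_of_nonneg _ _ hj0, List.getD_eq_getElem _ _ hjr,
    List.getElem_take, List.getElem_drop, List.getD_eq_getElem _ _ (by omega : j.toNat + k * b < padded.length)]
  congr 1
  omega

-- the two ports agree for every block_size ≠ 0
theorem pvMain (bits : List Int) (block_size : Int) (hbs : block_size ≠ 0) :
    interleave_bits bits block_size = interleave_bits_alt bits block_size := by
  rcases lt_or_gt_of_ne hbs with hneg | hpos
  · simp [interleave_bits, interleave_bits_alt,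
      PySem.List.pyRange_one_eq_nil (le_of_lt hneg)]
  · lift block_size to Nat using le_of_lt hpos with b
    have hb : 0 < b := by exact_mod_cast hpos
    have hbz : (b : Int) ≠ 0 := hbs
    -- the padded list
    set p : Nat := (PySem.Int.mod (-(bits.length : Int)) (b : Int)).toNat with hp
    set padded : List Int := bits ++ List.replicate p 0 with hpadded
    have hpadA : pvPadLoopA ((b : Int)).natAbs bits.length (b : Int) 0 = p := by
      rw [pvPadLoopA_eq (b : Int) hpos _ bits.length 0 ?_]
      · omega
      · have := PySem.Int.mod_lt (-(bits.length : Int)) hpos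
        have := PySem.Int.mod_nonneg (-(bits.length : Int)) hpos
        simp only [Int.natAbs_natCast]
        omega
    have hdvd : b ∣ padded.length := by
      have h1 : ((b : Int)) ∣ (padded.length : Int) := by
        have hnn := PySem.Int.mod_nonneg (-(bits.length : Int)) hpos
        have hlen : (padded.length : Int) = (bits.length : Int) + (-(bits.length : Int)) % (b : Int) := by
          have hnn' : 0 ≤ (-(bits.length : Int)) % (b : Int) := by
            rwa [PySem.Int.mod_eq_emod_of_pos hpos] at hnn
          simp [hpadded, hp, PySem.Int.mod_eq_emod_of_pos hpos]
          omega
        rw [hlen]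
        apply Int.dvd_of_emod_eq_zero
        calc ((bits.length : Int) + (-(bits.length : Int)) % (b : Int)) % (b : Int)
            = ((bits.length : Int) % b + ((-(bits.length : Int)) % (b : Int)) % b) % b := Int.add_emod _ _ _
          _ = ((bits.length : Int) % b + (-(bits.length : Int)) % (b : Int)) % b := by
              rw [Int.emod_emod_of_dvd _ dvd_rfl]
          _ = ((bits.length : Int) + -(bits.length : Int)) % b := (Int.add_emod _ _ _).symm
          _ = 0 := by simp
      exact_mod_cast h1
    obtain ⟨q, hq⟩ := hdvd
    have hN : padded.length = q * b := by rw [hq, Nat.mul_comm]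
    have hnb : PySem.Int.floordiv (padded.length : Int) (b : Int) = (q : Int) := by
      rw [PySem.Int.floordiv_natCast, hN, Nat.mul_div_cancel q hb]
    -- unfold both ports
    simp only [interleave_bits, interleave_bits_alt]
    rw [hpadA, ← hp, ← hpadded, hnb]
    -- B's flatMap as the same append-fold, A's matrix as a map
    have hB : (PySem.List.pyRange 0 (b : Int) 1).flatMap
          (fun j => (PySem.List.slice? padded (some j) none (b : Int)).getD [])
        = (PySem.List.pyRange 0 (b : Int) 1).foldl
          (fun out j => out ++ (PySem.List.slice? padded (some j) none (b : Int)).getD []) [] := by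
      rw [PySem.List.foldl_append_eq_flatMap, List.nil_append]
    rw [hB, PySem.List.foldl_append_singleton_eq_map, List.nil_append]
    apply PySem.List.foldl_congr_mem
    intro acc j hj
    obtain ⟨hj0, hjb⟩ := (PySem.List.mem_pyRange_one).mp hj
    have hjb' : j.toNat < b := by omega
    rw [PySem.List.foldl_append_singleton_eq_map, matrix_col padded b q hb hN j hj0 hjb',
      slice_col padded b q hb hN j hj0 hjb']
    rfl

-- ===== VERDICT (by name: the statement is the Claim_ definition above) =====
theorem interleave_bits_spec : Claim_equal_interleave_bits := by
  intro bits block_size _ hbs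
  unfold Spec_interleave_bits
  exact pvMain bits block_size hbs
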